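-- pv_equiv track=rewrite | github.com/wjy3452801181-a11y/PayFi-Box | scripts/verify_step7b.py | _timeline_contains_required_actions
-- ===== SOURCE A (Python) =====
-- from typing import Any
--
-- def _timeline_contains_required_actions(items: list[dict[str, Any]]) -> bool:
--     actions = [str(x.get("action", "")) for x in items]
--     entity_types = [str(x.get("entity_type", "")) for x in items]
--
--     has_confirm = any(a.startswith("confirm_") or a == "command_confirmation_snapshot" for a in actions)
--     has_execution = any(a in {"mock_execute", "retry_mock_executed", "payment_execution_snapshot"} for a in actions)
--     return (
--         "command_received" in actions
--         and "command_parsed" in actions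
--         and has_confirm
--         and "payment_order" in entity_types
--         and "payment_split" in entity_types
--         and has_execution
--     )
-- ===== SOURCE B (Python) =====
-- from typing import Any
--
-- def _timeline_contains_required_actions(items: list[dict[str, Any]]) -> bool:
--     received = parsed = confirm = order = split = execution = False
--     for x in items:
--         a = str(x.get("action", ""))
--         e = str(x.get("entity_type", ""))
--         received = received or a == "command_received"
--         parsed = parsed or a == "command_parsed"
--         confirm = confirm or a.startswith("confirm_") or a == "command_confirmation_snapshot"
--         execution = execution or a in ("mock_execute", "retry_mock_executed", "payment_execution_snapshot")
--         order = order or e == "payment_order"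
--         split = split or e == "payment_split"
--     return received and parsed and confirm and order and split and execution
-- ===== Notes on version B (the rewrite author's own statement) =====
-- stated objective: alternative
-- what changed: B fuses A's two materialized lists and six separate scans (four membership tests plus two any-comprehensions) into one pass over items that OR-updates six boolean flags.
import Mathlib
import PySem

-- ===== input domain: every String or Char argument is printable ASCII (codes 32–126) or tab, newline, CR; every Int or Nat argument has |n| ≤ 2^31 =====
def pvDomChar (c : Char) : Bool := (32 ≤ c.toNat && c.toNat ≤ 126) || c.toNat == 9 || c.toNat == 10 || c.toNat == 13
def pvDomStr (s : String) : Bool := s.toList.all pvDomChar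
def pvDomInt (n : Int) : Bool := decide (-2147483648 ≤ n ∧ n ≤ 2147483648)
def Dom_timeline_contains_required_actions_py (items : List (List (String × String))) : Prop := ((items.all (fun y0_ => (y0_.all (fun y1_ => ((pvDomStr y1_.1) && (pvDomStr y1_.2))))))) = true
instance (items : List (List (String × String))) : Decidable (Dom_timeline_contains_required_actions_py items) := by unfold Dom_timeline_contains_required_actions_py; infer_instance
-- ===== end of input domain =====

-- B fuses A's two materialized lists and six separate scans into one pass maintaining six boolean flags; return value only.


-- ===== PORT A =====
def timeline_contains_required_actions_py (items : List (List (String × String))) : Bool :=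
  let actions := items.map (fun x => (PySem.Dict.mk x).getD "action" "")
  let entity_types := items.map (fun x => (PySem.Dict.mk x).getD "entity_type" "")
  let has_confirm := actions.any (fun a => PySem.Str.startswith a "confirm_" || a == "command_confirmation_snapshot")
  let has_execution := actions.any (fun a => a == "mock_execute" || a == "retry_mock_executed" || a == "payment_execution_snapshot")
  actions.contains "command_received"
    && actions.contains "command_parsed"
    && has_confirm
    && entity_types.contains "payment_order"
    && entity_types.contains "payment_split"
    && has_execution

-- ===== PORT B =====
def pvFlags : Type := Bool × Bool × Bool × Bool × Bool × Bool

def pvStep (s : pvFlags) (x : List (String × String)) : pvFlags :=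
  let a := (PySem.Dict.mk x).getD "action" ""
  let e := (PySem.Dict.mk x).getD "entity_type" ""
  ( s.1 || a == "command_received"
  , s.2.1 || a == "command_parsed"
  , s.2.2.1 || PySem.Str.startswith a "confirm_" || a == "command_confirmation_snapshot"
  , s.2.2.2.1 || a == "mock_execute" || a == "retry_mock_executed" || a == "payment_execution_snapshot"
  , s.2.2.2.2.1 || e == "payment_order"
  , s.2.2.2.2.2 || e == "payment_split" )

def timeline_contains_required_actions_py_alt (items : List (List (String × String))) : Bool :=
  let s := items.foldl pvStep ((false, false, false, false, false, false) : pvFlags)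
  s.1 && s.2.1 && s.2.2.1 && s.2.2.2.2.1 && s.2.2.2.2.2 && s.2.2.2.1

-- ===== PRECONDITION & SPEC =====
def Spec_timeline_contains_required_actions_py (items : List (List (String × String))) (out : Bool) : Prop := out = timeline_contains_required_actions_py_alt items
instance (items : List (List (String × String))) (out : Bool) : Decidable (Spec_timeline_contains_required_actions_py items out) := by unfold Spec_timeline_contains_required_actions_py; infer_instance

-- ===== CLAIM (what is proved, stated in full; the proofs are below) =====
def Claim_equal_timeline_contains_required_actions_py : Prop := ∀ (items : List (List (String × String))), Dom_timeline_contains_required_actions_py items → Spec_timeline_contains_required_actions_py items (timeline_contains_required_actions_py items)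

-- ===== LEMMAS AND PROOFS =====

theorem pv_contains_map {α β : Type} [BEq β] [LawfulBEq β] (l : List α) (f : α → β) (a : β) :
    (l.map f).contains a = l.any (fun x => f x == a) := by
  induction l with
  | nil => rfl
  | cons y ys ih => simp only [List.map_cons, List.contains_cons, List.any_cons, ih, BEq.comm]

/-- The fold just ORs six independent `any`s onto the initial flags. -/
theorem pvStep_foldl (items : List (List (String × String))) (s : pvFlags) :
    items.foldl pvStep s =
      ( s.1 || items.any (fun x => (PySem.Dict.mk x).getD "action" "" == "command_received")
      , s.2.1 || items.any (fun x => (PySem.Dict.mk x).getD "action" "" == "command_parsed")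
      , s.2.2.1 || items.any (fun x => PySem.Str.startswith ((PySem.Dict.mk x).getD "action" "") "confirm_" || (PySem.Dict.mk x).getD "action" "" == "command_confirmation_snapshot")
      , s.2.2.2.1 || items.any (fun x => (PySem.Dict.mk x).getD "action" "" == "mock_execute" || (PySem.Dict.mk x).getD "action" "" == "retry_mock_executed" || (PySem.Dict.mk x).getD "action" "" == "payment_execution_snapshot")
      , s.2.2.2.2.1 || items.any (fun x => (PySem.Dict.mk x).getD "entity_type" "" == "payment_order")
      , s.2.2.2.2.2 || items.any (fun x => (PySem.Dict.mk x).getD "entity_type" "" == "payment_split") ) := by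
  induction items generalizing s with
  | nil => simp [pvFlags]
  | cons x xs ih =>
    simp only [List.foldl_cons, ih, List.any_cons, pvStep]
    obtain ⟨b1, b2, b3, b4, b5, b6⟩ := s
    simp [Bool.or_assoc, Bool.or_comm, Bool.or_left_comm]

-- ===== VERDICT (by name: the statement is the Claim_ definition above) =====
theorem timeline_contains_required_actions_py_spec : Claim_equal_timeline_contains_required_actions_py := by
  intro items _
  show timeline_contains_required_actions_py items = timeline_contains_required_actions_py_alt items
  simp only [timeline_contains_required_actions_py, timeline_contains_required_actions_py_alt,
    pvStep_foldl, pv_contains_map, List.any_map, Function.comp_def, Bool.false_or]
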